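-- pv_equiv track=rewrite | github.com/afzalsiddique/problem-solving | Problem_Solving_Python/leetcode/lc468.py | valid_v4_helper
-- ===== SOURCE A (Python) =====
-- def valid_v4_helper(x):
--     if len(x)==0 or len(x)>3: return False
--     if len(x)>1: # 01 is invalid
--         valid = (0 < ord(x[0]) - ord('0') <= 9)
--         if not valid: return False
--     for i in range(len(x)):
--         valid = (0 <= ord(x[i]) - ord('0') <= 9)
--         if not valid: return False
--     if int(x)<0 or int(x)>255: return False
--     return True
-- ===== SOURCE B (Python) =====
-- def valid_v4_helper(x):
--     try:
--         n = int(x)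
--     except ValueError:
--         return False
--     return str(n) == x and 0 <= n <= 255
-- ===== Notes on version B (the rewrite author's own statement) =====
-- stated objective: simpler
-- what changed: Replaces A's char-by-char ord() scan with leading-zero guard and manual checks by a parse-and-round-trip check: int(x) in try/except, then str(n) == x and 0 <= n <= 255.
import Mathlib
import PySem

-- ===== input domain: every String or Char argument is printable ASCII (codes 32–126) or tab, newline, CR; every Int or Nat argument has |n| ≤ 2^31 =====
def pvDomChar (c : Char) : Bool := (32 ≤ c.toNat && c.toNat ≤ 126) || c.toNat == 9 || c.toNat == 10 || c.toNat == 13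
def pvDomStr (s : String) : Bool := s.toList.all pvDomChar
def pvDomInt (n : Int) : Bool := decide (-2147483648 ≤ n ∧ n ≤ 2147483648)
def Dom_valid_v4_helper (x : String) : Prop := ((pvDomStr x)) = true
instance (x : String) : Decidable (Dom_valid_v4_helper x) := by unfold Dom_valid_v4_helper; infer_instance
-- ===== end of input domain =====

-- B replaces A's char-by-char scan and leading-zero guard with a parse-and-round-trip check
-- (int(x) then str(n) == x and 0 <= n <= 255); objective: simpler.

-- ===== PORT A =====
-- A, transliterated on the char list of x (PySem string primitives are defined on List Char).
def validV4Chars (cs : List Char) : Bool :=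
  -- if len(x)==0 or len(x)>3: return False
  if cs.length == 0 || decide (3 < cs.length) then false
  -- if len(x)>1: valid = (0 < ord(x[0]) - ord('0') <= 9); if not valid: return False
  -- (x[0] is safe here: this branch is only reached with len(x) > 1, so headI is the real head)
  else if decide (1 < cs.length)
          && !(decide (0 < (cs.headI.toNat : Int) - 48) && decide ((cs.headI.toNat : Int) - 48 ≤ 9)) then false
  -- for i in range(len(x)): valid = (0 <= ord(x[i]) - ord('0') <= 9); if not valid: return False
  else if !(cs.all fun c => decide (0 ≤ (c.toNat : Int) - 48) && decide ((c.toNat : Int) - 48 ≤ 9)) then false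
  -- if int(x)<0 or int(x)>255: return False   (int(x) = PySem.Int.ofChars?; the none branch is
  -- Python's ValueError, unreachable here because the digit loop already succeeded)
  else match PySem.Int.ofChars? cs with
    | none => false
    | some n => if decide (n < 0) || decide (255 < n) then false else true

def valid_v4_helper (x : String) : Bool := validV4Chars x.toList

-- ===== PORT B =====
-- B, transliterated: try: n = int(x) except ValueError: return False; return str(n) == x and 0 <= n <= 255
-- (str(n) == x is compared on char lists: PySem.Int.toChars n = (str(n)).toList).
def validV4AltChars (cs : List Char) : Bool :=
  match PySem.Int.ofChars? cs with
  | none => false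
  | some n => (PySem.Int.toChars n == cs) && (decide (0 ≤ n) && decide (n ≤ 255))

def valid_v4_helper_alt (x : String) : Bool := validV4AltChars x.toList

-- ===== PRECONDITION & SPEC =====
def Spec_valid_v4_helper (x : String) (out : Bool) : Prop := out = valid_v4_helper_alt x
instance (x : String) (out : Bool) : Decidable (Spec_valid_v4_helper x out) := by unfold Spec_valid_v4_helper; infer_instance

-- ===== CLAIM (what is proved, stated in full; the proofs are below) =====
def Claim_equal_valid_v4_helper : Prop := ∀ (x : String), Dom_valid_v4_helper x → Spec_valid_v4_helper x (valid_v4_helper x)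

-- ===== LEMMAS AND PROOFS =====

-- the ten ASCII digit characters
def dig (i : Fin 10) : Char := ['0','1','2','3','4','5','6','7','8','9'].get i

lemma dig_toNat : ∀ i : Fin 10, (dig i).toNat = 48 + i.val := by decide

lemma char_eq_dig (c : Char) (h1 : 48 ≤ c.toNat) (h2 : c.toNat ≤ 57) :
    ∃ i : Fin 10, c = dig i := by
  refine ⟨⟨c.toNat - 48, by omega⟩, ?_⟩
  have hv : (dig ⟨c.toNat - 48, by omega⟩).toNat = c.toNat := by
    rw [dig_toNat]; show 48 + (c.toNat - 48) = c.toNat; omega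
  exact (Char.ext (UInt32.toNat_inj.mp hv)).symm

-- int() on a three-digit string
set_option maxHeartbeats 4000000 in
set_option maxRecDepth 40000 in
lemma parse3 : ∀ i j k : Fin 10,
    PySem.Int.ofChars? [dig i, dig j, dig k]
      = some ((100 * i.val + 10 * j.val + k.val : Nat) : Int) := by decide

-- str(n) on canonical digit strings
lemma toChars1 : ∀ i : Fin 10, PySem.Int.toChars ((i.val : Nat) : Int) = [dig i] := by decide
lemma toChars2 : ∀ i j : Fin 10, 0 < i.val →
    PySem.Int.toChars ((10 * i.val + j.val : Nat) : Int) = [dig i, dig j] := by decide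
set_option maxHeartbeats 4000000 in
set_option maxRecDepth 40000 in
lemma toChars3 : ∀ i j k : Fin 10, 0 < i.val → 100 * i.val + 10 * j.val + k.val ≤ 255 →
    PySem.Int.toChars ((100 * i.val + 10 * j.val + k.val : Nat) : Int) = [dig i, dig j, dig k] := by decide

-- both programs accept every canonical octet string str(k), k = 0..255
set_option maxHeartbeats 4000000 in
set_option maxRecDepth 40000 in
lemma canonA : ∀ k : Fin 256, validV4Chars (PySem.Int.toChars ((k.val : Nat) : Int)) = true := by decide
set_option maxHeartbeats 4000000 in
set_option maxRecDepth 40000 in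
lemma canonB : ∀ k : Fin 256, validV4AltChars (PySem.Int.toChars ((k.val : Nat) : Int)) = true := by decide


-- on a non-canonical string B rejects: either int(x) raises, or the round trip fails
lemma altFalse_of_not_canon (cs : List Char)
    (hmem : ¬ ∃ k : Fin 256, cs = PySem.Int.toChars ((k.val : Nat) : Int)) :
    validV4AltChars cs = false := by
  unfold validV4AltChars
  cases h : PySem.Int.ofChars? cs with
  | none => rfl
  | some n =>
    by_cases hb : 0 ≤ n ∧ n ≤ 255
    · have hne : PySem.Int.toChars n ≠ cs := by
        intro he
        refine hmem ⟨⟨n.toNat, by omega⟩, ?_⟩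
        rw [← he]
        congr 1
        show n = ((n.toNat : Nat) : Int)
        omega
      simp [hne]
    · rcases not_and_or.mp hb with hb | hb <;> simp [hb]

-- on a non-canonical string A rejects as well
lemma aFalse_of_not_canon (cs : List Char)
    (hmem : ¬ ∃ k : Fin 256, cs = PySem.Int.toChars ((k.val : Nat) : Int)) :
    validV4Chars cs = false := by
  unfold validV4Chars
  split_ifs with h1 h2 h3
  · rfl
  · rfl
  · rfl
  · simp only [Bool.or_eq_true, beq_iff_eq, decide_eq_true_eq, not_or] at h1
    simp only [Bool.not_eq_true, Bool.not_eq_false', List.all_eq_true, Bool.and_eq_true,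
      decide_eq_true_eq] at h3
    rcases cs with _ | ⟨a, _ | ⟨b, _ | ⟨c, _ | ⟨d, rest⟩⟩⟩⟩
    · exact absurd (by simp) h1.1
    · -- length 1: such a string is always canonical, contradicting hmem
      exfalso
      have ha := h3 a (by simp)
      obtain ⟨i, rfl⟩ := char_eq_dig a (by omega) (by omega)
      exact hmem ⟨⟨i.val, by omega⟩, (toChars1 i).symm⟩
    · -- length 2: leading digit nonzero, value ≤ 99: always canonical, contradicting hmem
      exfalso
      have ha := h3 a (by simp)
      have hb := h3 b (by simp)
      obtain ⟨i, rfl⟩ := char_eq_dig a (by omega) (by omega)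
      obtain ⟨j, rfl⟩ := char_eq_dig b (by omega) (by omega)
      simp only [List.headI_cons, List.length_cons, List.length_nil] at h2
      have hd := dig_toNat i
      have hI := i.isLt
      have hJ := j.isLt
      have hi : 0 < i.val := by
        by_contra h0
        apply h2
        have hz : ((dig i).toNat : Int) - 48 = 0 := by omega
        simp [hz]
      exact hmem ⟨⟨10 * i.val + j.val, by omega⟩, (toChars2 i j hi).symm⟩
    · -- length 3: if the value is ≤ 255 the string is canonical (contradiction);
      -- otherwise A's final range check rejects it
      have ha := h3 a (by simp)
      have hb := h3 b (by simp)
      have hc := h3 c (by simp)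
      obtain ⟨i, rfl⟩ := char_eq_dig a (by omega) (by omega)
      obtain ⟨j, rfl⟩ := char_eq_dig b (by omega) (by omega)
      obtain ⟨k, rfl⟩ := char_eq_dig c (by omega) (by omega)
      simp only [List.headI_cons, List.length_cons, List.length_nil] at h2
      have hd := dig_toNat i
      have hI := i.isLt
      have hJ := j.isLt
      have hK := k.isLt
      have hi : 0 < i.val := by
        by_contra h0
        apply h2
        have hz : ((dig i).toNat : Int) - 48 = 0 := by omega
        simp [hz]
      rw [parse3 i j k]
      by_cases hN : 100 * i.val + 10 * j.val + k.val ≤ 255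
      · exact absurd ⟨⟨100 * i.val + 10 * j.val + k.val, by omega⟩,
          (toChars3 i j k hi hN).symm⟩ hmem
      · simp
        intro _
        omega
    · -- length ≥ 4: excluded by the length check
      exfalso
      have h14 := h1.2
      simp only [List.length_cons] at h14
      omega

lemma main_eq (cs : List Char) : validV4Chars cs = validV4AltChars cs := by
  by_cases hmem : ∃ k : Fin 256, cs = PySem.Int.toChars ((k.val : Nat) : Int)
  · obtain ⟨k, hk⟩ := hmem
    rw [hk, canonA k, canonB k]
  · rw [altFalse_of_not_canon cs hmem, aFalse_of_not_canon cs hmem]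

-- ===== VERDICT (by name: the statement is the Claim_ definition above) =====
theorem valid_v4_helper_spec : Claim_equal_valid_v4_helper := by
  intro x _
  unfold Spec_valid_v4_helper valid_v4_helper valid_v4_helper_alt
  exact main_eq x.toList
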